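-- pv_equiv track=rewrite | github.com/Cecilia520/algorithmic-learning-leetcode | cecilia-python/company-title/jingdong/MaxStringIntervals.py | getMaxStringIntervals
-- ===== SOURCE A (Python) =====
-- def getMaxStringIntervals(s: str) -> int:
--     """
--     获得最长字符区间
--     思路：可以将字符串进行复制一遍放一起，利用双指针的方法进行遍历获得
--     :param s:
--     :return:
--     """
--     # 判断全是1或者全0的情况
--     if s == '1' * len(s):
--         return len(s)
--
--     if s == '0' * len(s):
--         return 0
--
--     max_intervals = 0
--     s = 2 * s
--     n = len(s)
--     i, j = 0, 0
--     while i < n: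
--         while i < n and s[i] == '1':
--             i += 1
--         max_intervals = max(max_intervals, i - j)
--         i += 1
--         j = i
--     return max_intervals
-- ===== SOURCE B (Python) =====
-- def getMaxStringIntervals(s: str) -> int:
--     # Single pass over s: track best interior run of '1's, the current run,
--     # and the length of the first (prefix) run; handle the circular wrap as
--     # prefix-run + suffix-run instead of scanning a doubled string.
--     if all(c == '1' for c in s):
--         return len(s)
--     best = 0
--     cur = 0
--     prefix = None
--     for c in s:
--         if c == '1':
--             cur += 1
--         else:
--             if prefix is None:
--                 prefix = cur
--             best = max(best, cur)
--             cur = 0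
--     return max(best, prefix + cur)
-- ===== Notes on version B (the rewrite author's own statement) =====
-- stated objective: faster
-- what changed: Replaced A's string-doubling + index-based two-pointer while-loop with a single for-loop pass over the original string tracking (best, current, prefix) runs, handling the circular wrap explicitly as prefix+suffix.
import Mathlib
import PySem

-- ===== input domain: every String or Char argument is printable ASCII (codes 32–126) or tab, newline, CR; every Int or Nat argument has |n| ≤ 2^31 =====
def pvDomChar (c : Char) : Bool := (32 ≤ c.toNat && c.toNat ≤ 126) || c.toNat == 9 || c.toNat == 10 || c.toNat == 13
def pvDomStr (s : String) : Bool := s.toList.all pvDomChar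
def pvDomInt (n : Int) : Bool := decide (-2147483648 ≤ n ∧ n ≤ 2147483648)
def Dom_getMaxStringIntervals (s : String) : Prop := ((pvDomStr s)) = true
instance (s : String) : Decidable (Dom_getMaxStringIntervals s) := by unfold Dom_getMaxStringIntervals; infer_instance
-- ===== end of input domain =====

-- B replaces A's string-doubling + two-pointer scan by a single pass with explicit
-- circular-wrap handling (prefix run + suffix run); same O(n) cost, no doubled copy.

-- ===== PORT A =====
-- inner while loop: "while i < n and s[i] == '1': i += 1" — consumes the leading
-- run of '1's, returning its length (= i - j) and the remaining suffix.
def pvTakeOnes : List Char → Nat × List Char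
  | [] => (0, [])
  | c :: cs =>
    if c = '1' then
      let (k, r) := pvTakeOnes cs
      (k + 1, r)
    else (0, c :: cs)

theorem pvTakeOnes_len_le (l : List Char) : (pvTakeOnes l).2.length ≤ l.length := by
  induction l with
  | nil => simp [pvTakeOnes]
  | cons c cs ih =>
    simp only [pvTakeOnes]
    split
    · simpa using Nat.le_succ_of_le ih
    · simp

-- outer while loop: state (max_intervals); each iteration consumes one run of '1's
-- (k = i - j), updates the max, then skips the separator character (i += 1; j = i).
def pvScan (t : List Char) (m : Int) : Int :=
  match t with
  | [] => m
  | c :: cs =>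
    let k := (pvTakeOnes (c :: cs)).1
    let r := (pvTakeOnes (c :: cs)).2
    let m' := max m (k : Int)
    match h2 : r with
    | [] => m'
    | _ :: r' => pvScan r' m'
termination_by t.length
decreasing_by
  have h := pvTakeOnes_len_le (c :: cs)
  simp only [show r = (pvTakeOnes (c :: cs)).2 from rfl] at h2
  rw [h2] at h
  simp at h ⊢
  omega

def getMaxStringIntervals (s : String) : Int :=
  let l := s.toList
  if l = List.replicate l.length '1' then (l.length : Int)
  else if l = List.replicate l.length '0' then 0
  else pvScan (l ++ l) 0

-- ===== PORT B =====
-- one fold step: state (best, cur, prefix); prefix is None until the first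
-- non-'1' character fixes it to the length of the leading run.
def pvStepB (st : Int × Int × Option Int) (c : Char) : Int × Int × Option Int :=
  if c = '1' then (st.1, st.2.1 + 1, st.2.2)
  else (max st.1 st.2.1, 0, match st.2.2 with | none => some st.2.1 | some p => some p)

-- `st.2.2.getD 0`: the all-'1' guard guarantees prefix is set, so the default is
-- never used (Python would raise on `None + cur`, which is unreachable).
def getMaxStringIntervals_alt (s : String) : Int :=
  let l := s.toList
  if l.all (fun c => c = '1') then (l.length : Int)
  else
    let st := l.foldl pvStepB (0, 0, none)
    max st.1 (st.2.2.getD 0 + st.2.1)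

-- ===== PRECONDITION & SPEC =====
def Spec_getMaxStringIntervals (s : String) (out : Int) : Prop := out = getMaxStringIntervals_alt s
instance (s : String) (out : Int) : Decidable (Spec_getMaxStringIntervals s out) := by unfold Spec_getMaxStringIntervals; infer_instance

-- ===== CLAIM (what is proved, stated in full; the proofs are below) =====
def Claim_equal_getMaxStringIntervals : Prop := ∀ (s : String), Dom_getMaxStringIntervals s → Spec_getMaxStringIntervals s (getMaxStringIntervals s)

-- ===== LEMMAS AND PROOFS =====

-- reference fold: (best-so-far, current run of '1's)
def pvF2 (st : Int × Int) (c : Char) : Int × Int :=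
  if c = '1' then (st.1, st.2 + 1) else (max st.1 st.2, 0)

theorem pvTakeOnes_eq (l : List Char) :
    pvTakeOnes l = ((l.takeWhile (fun c => c = '1')).length, l.dropWhile (fun c => c = '1')) := by
  induction l with
  | nil => simp [pvTakeOnes]
  | cons c cs ih =>
    by_cases h : c = '1' <;> simp [pvTakeOnes, h, ih]

theorem pvF2_ones (p : List Char) (hp : ∀ c ∈ p, c = '1') (B C : Int) :
    p.foldl pvF2 (B, C) = (B, C + p.length) := by
  induction p generalizing C with
  | nil => simp
  | cons c cs ih =>
    have hc : c = '1' := hp c (by simp)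
    have hcs : ∀ x ∈ cs, x = '1' := fun x hm => hp x (by simp [hm])
    rw [List.foldl_cons, show pvF2 (B, C) c = (B, C + 1) by simp [pvF2, hc],
      ih hcs (C + 1)]
    simp only [Prod.mk.injEq, true_and, List.length_cons]
    push_cast
    ring

theorem pvF2_shift (z : List Char) (B C : Int) (hB : 0 ≤ B) :
    z.foldl pvF2 (B, C) = (max B (z.foldl pvF2 (0, C)).1, (z.foldl pvF2 (0, C)).2) := by
  induction z generalizing B C with
  | nil => simp; omega
  | cons c cs ih =>
    by_cases h : c = '1'
    · rw [List.foldl_cons, List.foldl_cons,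
        show pvF2 (B, C) c = (B, C + 1) by simp [pvF2, h],
        show pvF2 ((0 : Int), C) c = (0, C + 1) by simp [pvF2, h]]
      exact ih B (C + 1) hB
    · rw [List.foldl_cons, List.foldl_cons,
        show pvF2 (B, C) c = (max B C, 0) by simp [pvF2, h],
        show pvF2 ((0 : Int), C) c = (max 0 C, 0) by simp [pvF2, h],
        ih (max B C) 0 (le_max_of_le_left hB), ih (max 0 C) 0 (le_max_left 0 C)]
      simp only [Prod.mk.injEq, and_true]
      omega

theorem pvScan_eq : ∀ (n : ℕ) (l : List Char), l.length ≤ n → ∀ (m : Int), 0 ≤ m →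
    pvScan l m = max (l.foldl pvF2 (m, 0)).1 (l.foldl pvF2 (m, 0)).2 := by
  intro n
  induction n with
  | zero =>
    intro l hl m hm
    have : l = [] := List.eq_nil_of_length_eq_zero (Nat.le_zero.mp hl)
    subst this
    simp [pvScan]
    omega
  | succ n ih =>
    intro l hl m hm
    match l with
    | [] => simp [pvScan]; omega
    | c :: cs =>
      rw [pvScan, pvTakeOnes_eq (c :: cs)]
      have hsplit := List.takeWhile_append_dropWhile (p := fun c => decide (c = '1')) (l := c :: cs)
      have hp : ∀ x ∈ (c :: cs).takeWhile (fun c => decide (c = '1')), x = '1' := by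
        intro x hx
        simpa using List.mem_takeWhile_imp hx
      cases hd : (c :: cs).dropWhile (fun c => decide (c = '1')) with
      | nil =>
        -- the whole list is ones
        have htW : (c :: cs).takeWhile (fun c => decide (c = '1')) = c :: cs := by
          rw [hd, List.append_nil] at hsplit
          exact hsplit
        have hall : ∀ x ∈ c :: cs, x = '1' := by rw [← htW]; exact hp
        simp only [htW]
        rw [pvF2_ones (c :: cs) hall m 0]
        simp
      | cons e z =>
        have he : ¬ (e = '1') := by
          have := List.head_dropWhile_not (fun c => decide (c = '1')) (l := c :: cs)
            (w := by simp [hd])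
          simp only [hd, List.head_cons] at this
          simpa using this
        have hlen : z.length ≤ n := by
          have h1 : ((c :: cs).dropWhile (fun c => decide (c = '1'))).length ≤ (c :: cs).length :=
            List.length_dropWhile_le _ _
          rw [hd] at h1
          simp at h1 hl
          omega
        simp only [hd]
        rw [ih z hlen _ (le_trans hm (le_max_left _ _))]
        conv_rhs => rw [← hsplit, hd]
        rw [List.foldl_append, pvF2_ones _ hp m 0, List.foldl_cons,
          show pvF2 (m, (0 : Int) + ((c :: cs).takeWhile (fun c => decide (c = '1'))).length) e
              = (max m ((0 : Int) + ((c :: cs).takeWhile (fun c => decide (c = '1'))).length), 0)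
            by simp [pvF2, he]]
        simp

-- B's fold once the prefix is fixed: it is the reference fold plus a constant prefix
theorem pvStepB_some (z : List Char) (b c P : Int) :
    z.foldl pvStepB (b, c, some P) =
      ((z.foldl pvF2 (b, c)).1, (z.foldl pvF2 (b, c)).2, some P) := by
  induction z generalizing b c with
  | nil => simp
  | cons e z ih =>
    by_cases h : e = '1'
    · rw [List.foldl_cons, List.foldl_cons,
        show pvStepB (b, c, some P) e = (b, c + 1, some P) by simp [pvStepB, h],
        show pvF2 (b, c) e = (b, c + 1) by simp [pvF2, h]]
      exact ih b (c + 1)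
    · rw [List.foldl_cons, List.foldl_cons,
        show pvStepB (b, c, some P) e = (max b c, 0, some P) by simp [pvStepB, h],
        show pvF2 (b, c) e = (max b c, 0) by simp [pvF2, h]]
      exact ih (max b c) 0

theorem pvStepB_ones (p : List Char) (hp : ∀ c ∈ p, c = '1') (b c : Int) (pre : Option Int) :
    p.foldl pvStepB (b, c, pre) = (b, c + p.length, pre) := by
  induction p generalizing c with
  | nil => simp
  | cons e p ih =>
    have he : e = '1' := hp e (by simp)
    have hps : ∀ x ∈ p, x = '1' := fun x hm => hp x (by simp [hm])
    rw [List.foldl_cons, show pvStepB (b, c, pre) e = (b, c + 1, pre) by simp [pvStepB, he],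
      ih hps (c + 1)]
    simp only [Prod.mk.injEq, true_and, and_true, List.length_cons]
    push_cast
    ring

theorem pvStepB_zeros (n : ℕ) :
    (List.replicate n '0').foldl pvStepB (0, 0, some 0) = (0, 0, some 0) := by
  induction n with
  | zero => simp
  | succ k ih =>
    rw [List.replicate_succ, List.foldl_cons,
      show pvStepB ((0 : Int), (0 : Int), some (0 : Int)) '0' = (0, 0, some 0)
        by simp [pvStepB]]
    exact ih

theorem pv_all_ones_iff (l : List Char) :
    (l.all (fun c => c = '1') = true) ↔ l = List.replicate l.length '1' := by
  rw [List.all_eq_true, List.eq_replicate_iff]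
  simp

-- the heart of the equivalence: for a list with at least one non-'1' character,
-- A's scan over l ++ l equals B's single pass with explicit wrap
theorem pv_main (l : List Char)
    (h1 : ¬ l = List.replicate l.length '1') :
    pvScan (l ++ l) 0 =
      max (l.foldl pvStepB (0, 0, none)).1
        ((l.foldl pvStepB (0, 0, none)).2.2.getD 0 + (l.foldl pvStepB (0, 0, none)).2.1) := by
  have hsplit := List.takeWhile_append_dropWhile (p := fun c => decide (c = '1')) (l := l)
  have hp : ∀ x ∈ l.takeWhile (fun c => decide (c = '1')), x = '1' := by
    intro x hx
    simpa using List.mem_takeWhile_imp hx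
  cases hd : l.dropWhile (fun c => decide (c = '1')) with
  | nil =>
    exfalso
    apply h1
    have htW : l.takeWhile (fun c => decide (c = '1')) = l := by
      rw [hd, List.append_nil] at hsplit
      exact hsplit
    have hall : ∀ x ∈ l, x = '1' := by rw [← htW]; exact hp
    exact List.eq_replicate_iff.mpr ⟨rfl, hall⟩
  | cons e z =>
    have he : ¬ (e = '1') := by
      have := List.head_dropWhile_not (fun c => decide (c = '1')) (l := l) (w := by simp [hd])
      simp only [hd, List.head_cons] at this
      simpa using this
    set p := l.takeWhile (fun c => decide (c = '1')) with hpdef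
    have hl : l = p ++ e :: z := by rw [← hsplit, hd]
    set P : Int := (p.length : Int) with hPdef
    have hP : 0 ≤ P := Int.natCast_nonneg _
    set q1 : Int := (z.foldl pvF2 (0, 0)).1 with hq1
    set q2 : Int := (z.foldl pvF2 (0, 0)).2 with hq2
    have foldl_l : ∀ B C : Int, 0 ≤ B →
        l.foldl pvF2 (B, C) = (max (max B (C + P)) q1, q2) := by
      intro B C hB
      rw [hl, List.foldl_append, pvF2_ones p hp B C, List.foldl_cons,
        show pvF2 (B, C + (p.length : Int)) e = (max B (C + (p.length : Int)), 0)
          by simp [pvF2, he],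
        pvF2_shift z (max B (C + (p.length : Int))) 0 (le_max_of_le_left hB)]
    -- A's side
    have hA : pvScan (l ++ l) 0 = max (max (max (max (max 0 (0 + P)) q1) (q2 + P)) q1) q2 := by
      rw [pvScan_eq (l ++ l).length (l ++ l) le_rfl 0 le_rfl, List.foldl_append,
        foldl_l 0 0 le_rfl,
        foldl_l (max (max 0 (0 + P)) q1) q2 (le_max_of_le_left (le_max_left _ _))]
    -- B's side
    have hB : l.foldl pvStepB (0, 0, none) = (max (max 0 (0 + P)) q1, q2, some P) := by
      rw [hl, List.foldl_append, pvStepB_ones p hp 0 0 none, List.foldl_cons,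
        show pvStepB ((0 : Int), (0 : Int) + (p.length : Int), (none : Option Int)) e
            = (max 0 ((0 : Int) + (p.length : Int)), 0, some ((0 : Int) + (p.length : Int)))
          by simp [pvStepB, he],
        pvStepB_some z (max 0 ((0 : Int) + (p.length : Int))) 0 ((0 : Int) + (p.length : Int)),
        pvF2_shift z (max 0 ((0 : Int) + (p.length : Int))) 0 (le_max_left _ _)]
      rw [← hq1, ← hq2, ← hPdef]
      norm_num
    rw [hA, hB]
    simp only [Option.getD_some]
    omega

-- ===== VERDICT (by name: the statement is the Claim_ definition above) =====
theorem getMaxStringIntervals_spec : Claim_equal_getMaxStringIntervals := by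
  intro s _
  unfold Spec_getMaxStringIntervals getMaxStringIntervals getMaxStringIntervals_alt
  set l := s.toList with hldef
  by_cases h1 : l = List.replicate l.length '1'
  · rw [if_pos h1, if_pos ((pv_all_ones_iff l).mpr h1)]
  · rw [if_neg h1, if_neg (fun h => h1 ((pv_all_ones_iff l).mp h))]
    by_cases h2 : l = List.replicate l.length '0'
    · rw [if_pos h2]
      -- l is a nonempty all-'0' string, so B also returns 0
      have hn : l.length ≠ 0 := by
        intro h0
        apply h1
        rw [List.length_eq_zero_iff.mp h0] at h2 ⊢
        simp
      obtain ⟨k, hk⟩ : ∃ k, l.length = k + 1 := ⟨l.length - 1, by omega⟩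
      show (0 : Int) =
        max (l.foldl pvStepB (0, 0, none)).1
          ((l.foldl pvStepB (0, 0, none)).2.2.getD 0 + (l.foldl pvStepB (0, 0, none)).2.1)
      rw [h2, hk, List.replicate_succ, List.foldl_cons,
        show pvStepB ((0 : Int), (0 : Int), (none : Option Int)) '0' = (0, 0, some 0)
          by simp [pvStepB],
        pvStepB_zeros k]
      simp
    · rw [if_neg h2]
      show pvScan (l ++ l) 0 =
        max (l.foldl pvStepB (0, 0, none)).1
          ((l.foldl pvStepB (0, 0, none)).2.2.getD 0 + (l.foldl pvStepB (0, 0, none)).2.1)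
      exact pv_main l h1
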